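-- pv_equiv track=rewrite | github.com/Accout-Personal/JigSawPacking | BrokenGlassGenerator.py | pieces_share_edge
-- ===== SOURCE A (Python) =====
-- def pieces_share_edge(piece1, piece2):
--     """Check if two pieces share an edge"""
--     # Create edge sets for both pieces
--     edges1 = set()
--     for i in range(len(piece1)):
--         edge = tuple(sorted([piece1[i], piece1[(i + 1) % len(piece1)]]))
--         edges1.add(edge)
--
--     edges2 = set()
--     for i in range(len(piece2)):
--         edge = tuple(sorted([piece2[i], piece2[(i + 1) % len(piece2)]]))
--         edges2.add(edge)
--
--     # Check for shared edges
--     return len(edges1.intersection(edges2)) > 0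
-- ===== SOURCE B (Python) =====
-- def pieces_share_edge(piece1, piece2):
--     """Check if two pieces share an edge"""
--     for a, b in zip(piece1, piece1[1:] + piece1[:1]):
--         for c, d in zip(piece2, piece2[1:] + piece2[:1]):
--             if (a == c and b == d) or (a == d and b == c):
--                 return True
--     return False
-- ===== Notes on version B (the rewrite author's own statement) =====
-- stated objective: alternative
-- what changed: Replaces A's sorted-tuple edge sets and set intersection with nested scans over vertex/successor pairs obtained by zipping each piece with its rotation, comparing edges as unordered pairs directly (no sorting, no index arithmetic, no auxiliary sets), with early exit.
import Mathlib
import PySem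

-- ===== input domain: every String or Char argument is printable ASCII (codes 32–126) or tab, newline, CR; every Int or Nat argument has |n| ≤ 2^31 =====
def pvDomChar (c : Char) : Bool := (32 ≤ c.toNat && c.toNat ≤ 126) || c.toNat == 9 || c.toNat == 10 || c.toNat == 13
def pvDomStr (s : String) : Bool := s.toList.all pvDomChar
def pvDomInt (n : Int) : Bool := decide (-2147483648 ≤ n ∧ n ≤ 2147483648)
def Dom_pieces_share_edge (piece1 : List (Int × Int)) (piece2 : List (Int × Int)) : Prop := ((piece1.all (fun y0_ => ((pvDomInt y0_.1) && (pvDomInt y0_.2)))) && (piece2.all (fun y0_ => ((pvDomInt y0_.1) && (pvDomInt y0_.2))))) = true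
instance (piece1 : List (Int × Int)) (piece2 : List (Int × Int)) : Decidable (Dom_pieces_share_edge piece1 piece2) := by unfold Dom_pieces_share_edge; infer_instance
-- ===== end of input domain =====

-- B replaces A's sorted-tuple edge sets + intersection with nested scans over the
-- vertex/successor pairs of each piece (zip with rotation), comparing edges as
-- unordered pairs directly — an alternative decomposition, not claimed faster.


-- ===== PORT A =====
-- tuple(sorted([a, b])) for two (int, int) tuples: Python's sort compares tuples
-- lexicographically; exact for the two-element case (ties keep order, but then a = b).
def pvSort2 (a b : Int × Int) : (Int × Int) × (Int × Int) :=
  if a.1 < b.1 ∨ (a.1 = b.1 ∧ a.2 ≤ b.2) then (a, b) else (b, a)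

-- p[i] and p[(i+1) % len(p)] for i in range(len(p)): both indices in range, so getD is exact.
def pvEdgeOf (p : List (Int × Int)) (i : Nat) : (Int × Int) × (Int × Int) :=
  pvSort2 (p.getD i (0, 0)) (p.getD ((i + 1) % p.length) (0, 0))

def pieces_share_edge (piece1 : List (Int × Int)) (piece2 : List (Int × Int)) : Bool :=
  let edges1 := (List.range piece1.length).foldl
    (fun s i => PySem.Set.add s (pvEdgeOf piece1 i)) PySem.Set.empty
  let edges2 := (List.range piece2.length).foldl
    (fun s i => PySem.Set.add s (pvEdgeOf piece2 i)) PySem.Set.empty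
  decide (0 < PySem.Set.len (PySem.Set.inter edges1 edges2))

-- ===== PORT B =====
-- zip(p, p[1:] + p[:1]) pairs each vertex with its cyclic successor; edges are
-- compared as unordered pairs, with early exit (List.any is short-circuiting).
def pieces_share_edge_alt (piece1 : List (Int × Int)) (piece2 : List (Int × Int)) : Bool :=
  (piece1.zip (piece1.drop 1 ++ piece1.take 1)).any (fun e =>
    (piece2.zip (piece2.drop 1 ++ piece2.take 1)).any (fun f =>
      decide ((e.1 = f.1 ∧ e.2 = f.2) ∨ (e.1 = f.2 ∧ e.2 = f.1))))

-- ===== PRECONDITION & SPEC =====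
def Spec_pieces_share_edge (piece1 : List (Int × Int)) (piece2 : List (Int × Int)) (out : Bool) : Prop := out = pieces_share_edge_alt piece1 piece2
instance (piece1 : List (Int × Int)) (piece2 : List (Int × Int)) (out : Bool) : Decidable (Spec_pieces_share_edge piece1 piece2 out) := by unfold Spec_pieces_share_edge; infer_instance

-- ===== CLAIM (what is proved, stated in full; the proofs are below) =====
def Claim_equal_pieces_share_edge : Prop := ∀ (piece1 : List (Int × Int)) (piece2 : List (Int × Int)), Dom_pieces_share_edge piece1 piece2 → Spec_pieces_share_edge piece1 piece2 (pieces_share_edge piece1 piece2)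

-- ===== LEMMAS AND PROOFS =====

-- membership in the edge set built by A's fold
theorem mem_edge_fold (p : List (Int × Int)) (e : (Int × Int) × (Int × Int)) :
    e ∈ (List.range p.length).foldl
      (fun s i => PySem.Set.add s (pvEdgeOf p i)) PySem.Set.empty ↔
      ∃ i ∈ List.range p.length, e = pvEdgeOf p i := by
  have h : (List.range p.length).foldl
      (fun s i => PySem.Set.add s (pvEdgeOf p i)) PySem.Set.empty
      = PySem.Set.update PySem.Set.empty ((List.range p.length).map (pvEdgeOf p)) := by
    simp [PySem.Set.update, List.foldl_map]
  rw [h, PySem.Set.mem_update]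
  simp [PySem.Set.empty, eq_comm]

-- two sorted 2-tuples coincide iff the underlying unordered pairs coincide
theorem pvSort2_eq_iff (a b c d : Int × Int) :
    pvSort2 a b = pvSort2 c d ↔ ((a = c ∧ b = d) ∨ (a = d ∧ b = c)) := by
  obtain ⟨a1, a2⟩ := a; obtain ⟨b1, b2⟩ := b
  obtain ⟨c1, c2⟩ := c; obtain ⟨d1, d2⟩ := d
  simp only [pvSort2, Prod.ext_iff]
  split_ifs <;> simp_all <;> omega

-- B's zipped pair list is the indexed edge-endpoint list
theorem zip_rot_eq_map (p : List (Int × Int)) :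
    p.zip (p.drop 1 ++ p.take 1) =
      (List.range p.length).map
        (fun i => (p.getD i (0, 0), p.getD ((i + 1) % p.length) (0, 0))) := by
  apply List.ext_getElem
  · simp; omega
  · intro i h1 h2
    have hi : i < p.length := by simpa using h2
    have hlen : (p.drop 1 ++ p.take 1).length = p.length := by simp; omega
    simp only [List.getElem_zip, List.getElem_map, List.getElem_range]
    refine Prod.ext ?_ ?_
    · simp [hi]
    · simp only [List.getD_eq_getElem _ _ (show (i + 1) % p.length < p.length from
        Nat.mod_lt _ (by omega))]
      by_cases hc : i + 1 < p.length
      · have hm : (i + 1) % p.length = i + 1 := Nat.mod_eq_of_lt hc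
        have hd : i < (p.drop 1).length := by simp; omega
        rw [List.getElem_append_left hd]
        simp [hm]
      · have hieq : i = p.length - 1 := by omega
        have hm : (i + 1) % p.length = 0 := by
          have : i + 1 = p.length := by omega
          simp [this]
        have hd : ¬ i < (p.drop 1).length := by simp; omega
        rw [List.getElem_append_right (by simpa using hd)]
        simp [hm, List.getElem_take, show i - (p.length - 1) = 0 from by omega]

theorem pieces_share_edge_eq_alt (p1 p2 : List (Int × Int)) :
    pieces_share_edge p1 p2 = pieces_share_edge_alt p1 p2 := by
  unfold pieces_share_edge pieces_share_edge_alt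
  rw [Bool.eq_iff_iff, zip_rot_eq_map p1, zip_rot_eq_map p2]
  simp only [PySem.Set.len, decide_eq_true_eq, List.any_eq_true, Nat.cast_pos,
    List.length_pos_iff_exists_mem, List.mem_map, List.mem_range]
  constructor
  · rintro ⟨e, he⟩
    rw [PySem.Set.mem_inter, mem_edge_fold, mem_edge_fold] at he
    obtain ⟨⟨i, hi, hei⟩, ⟨j, hj, hej⟩⟩ := he
    have := (pvSort2_eq_iff _ _ _ _).mp (hei ▸ hej : pvEdgeOf p1 i = pvEdgeOf p2 j)
    simp only [List.mem_range] at hi hj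
    exact ⟨_, ⟨i, hi, rfl⟩, _, ⟨j, hj, rfl⟩, by simpa using this⟩
  · rintro ⟨e, ⟨i, hi, rfl⟩, f, ⟨j, hj, rfl⟩, hef⟩
    refine ⟨pvEdgeOf p1 i, ?_⟩
    rw [PySem.Set.mem_inter, mem_edge_fold, mem_edge_fold]
    refine ⟨⟨i, by simpa using hi, rfl⟩, ⟨j, by simpa using hj, ?_⟩⟩
    exact (pvSort2_eq_iff _ _ _ _).mpr (by simpa using hef)

-- ===== VERDICT (by name: the statement is the Claim_ definition above) =====
theorem pieces_share_edge_spec : Claim_equal_pieces_share_edge := by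
  intro p1 p2 _
  exact pieces_share_edge_eq_alt p1 p2
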